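-- pv_equiv track=rewrite | github.com/idilissever/Industrial-Engineering-KU | INDR220/HW/HW6/0080447.py | create_constraint_matrix
-- ===== SOURCE A (Python) =====
-- def create_constraint_matrix(M, N):
--     A = []
--     for i in range(M):
--         for j in range(N):
--             # check all attacking positions
--             if i + 2 < M:
--                 if j + 1 < N:
--                     row = [0] * (M*N)
--                     row[i*N + j] = 1
--                     row[(i+2)*N + j+1] = 1
--                     if row not in A:
--                         A.append(row)
--
--                 if j - 1 >= 0:
--                     row = [0] * (M*N)
--                     row[i*N + j] = 1
--                     row[(i+2)*N + j-1] = 1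
--                     if row not in A:
--                         A.append(row)
--             if i - 2 >= 0:
--                 if j + 1 < N:
--                     row = [0] * (M*N)
--                     row[i*N + j] = 1
--                     row[(i-2)*N + j+1] = 1
--                     if row not in A:
--                         A.append(row)
--                 if j - 1 >= 0:
--                     row = [0] * (M*N)
--                     row[i*N + j] = 1
--                     row[(i-2)*N + j-1] = 1
--                     if row not in A:
--                         A.append(row)
--             if j + 2 < N:
--                 if i + 1 < M:
--                     row = [0] * (M*N)
--                     row[i*N + j] = 1
--                     row[(i+1)*N + j+2] = 1
--                     if row not in A:
--                         A.append(row)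
--                 if i - 1 >= 0:
--                     row = [0] * (M*N)
--                     row[i*N + j] = 1
--                     row[(i-1)*N + j+2] = 1
--                     if row not in A:
--                         A.append(row)
--             if j - 2 >= 0:
--                 if i + 1 < M:
--                     row = [0] * (M*N)
--                     row[i*N + j] = 1
--                     row[(i+1)*N + j-2] = 1
--                     if row not in A:
--                         A.append(row)
--                 if i - 1 >= 0:
--                     row = [0] * (M*N)
--                     row[i*N + j] = 1
--                     row[(i-1)*N + j-2] = 1
--                     if row not in A:
--                         A.append(row)
--
--     return A
-- ===== SOURCE B (Python) =====
-- def create_constraint_matrix(M, N):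
--     A = []
--     for i in range(M):
--         for j in range(N):
--             # only the four "forward" knight moves (toward larger row-major
--             # index): the backward ones would duplicate an earlier row.
--             for di, dj in ((2, 1), (2, -1), (1, 2), (1, -2)):
--                 r, c = i + di, j + dj
--                 if 0 <= r < M and 0 <= c < N:
--                     row = [0] * (M * N)
--                     row[i * N + j] = 1
--                     row[r * N + c] = 1
--                     A.append(row)
--     return A
-- ===== Notes on version B (the rewrite author's own statement) =====
-- stated objective: faster
-- what changed: Instead of generating all eight knight moves per cell and deduplicating each candidate row with a linear 'row not in A' scan over the growing result list, B emits only the four forward moves (toward a strictly larger row-major index) unconditionally, which by symmetry produces each attack-pair row exactly once in the same order, so the dedup scan disappears.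
import Mathlib
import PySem

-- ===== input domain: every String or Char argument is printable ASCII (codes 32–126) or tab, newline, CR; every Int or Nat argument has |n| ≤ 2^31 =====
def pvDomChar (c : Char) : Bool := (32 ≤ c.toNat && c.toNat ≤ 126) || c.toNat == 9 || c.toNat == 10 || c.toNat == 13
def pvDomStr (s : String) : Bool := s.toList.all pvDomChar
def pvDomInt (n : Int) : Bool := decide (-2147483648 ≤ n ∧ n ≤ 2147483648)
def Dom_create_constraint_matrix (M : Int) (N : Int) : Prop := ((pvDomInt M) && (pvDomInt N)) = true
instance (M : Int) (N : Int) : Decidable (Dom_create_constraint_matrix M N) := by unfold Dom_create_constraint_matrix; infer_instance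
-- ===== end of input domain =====

-- B drops A's 'row not in A' dedup scan: it emits only the four forward knight
-- moves per cell, which produces each attack row exactly once in the same order
-- (objective: faster — the linear membership scan over the result disappears).

-- ===== PORT A =====
-- row = [0]*(M*N); row[p] = 1; row[q] = 1   (indices are always in range when reached)
def pvRow (M N p q : Int) : List Int :=
  PySem.List.pySetD (PySem.List.pySetD (List.replicate (M * N).toNat 0) p 1) q 1

-- if row not in A: A.append(row)
def pvAdd (acc : List (List Int)) (row : List Int) : List (List Int) :=
  if row ∈ acc then acc else acc ++ [row]

-- the body of A's double loop for one cell (i, j): eight guarded dedup-appends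
def pvCellA (M N : Int) (acc : List (List Int)) (i j : Int) : List (List Int) :=
  let a1 :=
    if i + 2 < M then
      let b1 := if j + 1 < N then pvAdd acc (pvRow M N (i*N + j) ((i+2)*N + j + 1)) else acc
      if j - 1 ≥ 0 then pvAdd b1 (pvRow M N (i*N + j) ((i+2)*N + j - 1)) else b1
    else acc
  let a2 :=
    if i - 2 ≥ 0 then
      let b2 := if j + 1 < N then pvAdd a1 (pvRow M N (i*N + j) ((i-2)*N + j + 1)) else a1
      if j - 1 ≥ 0 then pvAdd b2 (pvRow M N (i*N + j) ((i-2)*N + j - 1)) else b2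
    else a1
  let a3 :=
    if j + 2 < N then
      let b3 := if i + 1 < M then pvAdd a2 (pvRow M N (i*N + j) ((i+1)*N + j + 2)) else a2
      if i - 1 ≥ 0 then pvAdd b3 (pvRow M N (i*N + j) ((i-1)*N + j + 2)) else b3
    else a2
  if j - 2 ≥ 0 then
    let b4 := if i + 1 < M then pvAdd a3 (pvRow M N (i*N + j) ((i+1)*N + j - 2)) else a3
    if i - 1 ≥ 0 then pvAdd b4 (pvRow M N (i*N + j) ((i-1)*N + j - 2)) else b4
  else a3

def create_constraint_matrix (M : Int) (N : Int) : List (List Int) :=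
  (PySem.List.pyRange 0 M 1).foldl (fun acc i =>
    (PySem.List.pyRange 0 N 1).foldl (fun acc j => pvCellA M N acc i j) acc) []

-- ===== PORT B =====
-- for di, dj in ((2,1),(2,-1),(1,2),(1,-2)): append the row when the target is on the board
def pvCellB (M N : Int) (acc : List (List Int)) (i j : Int) : List (List Int) :=
  [((2:Int),(1:Int)), (2,-1), (1,2), (1,-2)].foldl (fun acc d =>
    let r := i + d.1
    let c := j + d.2
    if 0 ≤ r ∧ r < M ∧ 0 ≤ c ∧ c < N then acc ++ [pvRow M N (i*N + j) (r*N + c)] else acc) acc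

def create_constraint_matrix_alt (M : Int) (N : Int) : List (List Int) :=
  (PySem.List.pyRange 0 M 1).foldl (fun acc i =>
    (PySem.List.pyRange 0 N 1).foldl (fun acc j => pvCellB M N acc i j) acc) []

-- ===== PRECONDITION & SPEC =====
def Spec_create_constraint_matrix (M : Int) (N : Int) (out : List (List Int)) : Prop := out = create_constraint_matrix_alt M N
instance (M : Int) (N : Int) (out : List (List Int)) : Decidable (Spec_create_constraint_matrix M N out) := by unfold Spec_create_constraint_matrix; infer_instance

-- ===== CLAIM (what is proved, stated in full; the proofs are below) =====
def Claim_equal_create_constraint_matrix : Prop := ∀ (M : Int) (N : Int), Dom_create_constraint_matrix M N → Spec_create_constraint_matrix M N (create_constraint_matrix M N)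

-- ===== LEMMAS AND PROOFS =====

-- the four forward knight moves (toward a strictly larger row-major index)
def pvFwdMove (d : Int × Int) : Prop := d = (2,1) ∨ d = (2,-1) ∨ d = (1,2) ∨ d = (1,-2)

-- cell (i,j) and its forward target (i+di, j+dj) are both on the M×N board
def pvFwd (M N i j di dj : Int) : Prop :=
  0 ≤ i ∧ i < M ∧ 0 ≤ j ∧ j < N ∧ pvFwdMove (di, dj) ∧
    0 ≤ i + di ∧ i + di < M ∧ 0 ≤ j + dj ∧ j + dj < N

-- rows produced by cells strictly before (I, J) in row-major order
def pvSeen (M N I J : Int) (row : List Int) : Prop :=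
  ∃ i j di dj, pvFwd M N i j di dj ∧ (i < I ∨ (i = I ∧ j < J)) ∧
    row = pvRow M N (i*N + j) ((i+di)*N + (j+dj))

def pvChar (M N I J : Int) (S : List (List Int)) : Prop :=
  ∀ row, row ∈ S ↔ pvSeen M N I J row

-- chain combinators used to flatten the two per-cell bodies
def pvCStep (g : Prop) [Decidable g] (row : List Int) (a : List (List Int)) : List (List Int) :=
  if g then pvAdd a row else a

def pvBStep (g : Prop) [Decidable g] (row : List Int) (a : List (List Int)) : List (List Int) :=
  if g then a ++ [row] else a

theorem pvCStep_mono {g : Prop} [Decidable g] {row a r} (h : r ∈ a) : r ∈ pvCStep g row a := by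
  unfold pvCStep pvAdd; split_ifs <;> simp [h]

theorem pvCStep_skip {g : Prop} [Decidable g] {row a} (h : g → row ∈ a) :
    pvCStep g row a = a := by
  unfold pvCStep pvAdd; split_ifs with h1 h2 <;> first | rfl | exact absurd (h h1) h2

theorem pvCStep_add {g : Prop} [Decidable g] {row a} (h : g → row ∉ a) :
    pvCStep g row a = pvBStep g row a := by
  unfold pvCStep pvAdd pvBStep; split_ifs with h1 h2 <;> first | rfl | exact absurd h2 (h h1)

theorem mem_pvBStep {g : Prop} [Decidable g] {row x : List Int} {a : List (List Int)} :
    row ∈ pvBStep g x a ↔ (g ∧ row = x) ∨ row ∈ a := by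
  unfold pvBStep; split_ifs with hg <;> simp [hg]; tauto

theorem pvBStep_congr {g g' : Prop} [Decidable g] [Decidable g'] (h : g ↔ g')
    (row : List Int) (a : List (List Int)) : pvBStep g row a = pvBStep g' row a := by
  unfold pvBStep
  by_cases hg : g
  · rw [if_pos hg, if_pos (h.mp hg)]
  · rw [if_neg hg, if_neg (fun hh => hg (h.mpr hh))]

theorem pvBStep_notmem {g : Prop} [Decidable g] {row x a} (h1 : row ∉ a) (h2 : g → row ≠ x) :
    row ∉ pvBStep g x a := by
  unfold pvBStep; split_ifs with hg
  · simp [h1, h2 hg]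
  · exact h1

theorem pvGrp (c ca cb : Prop) [Decidable c] [Decidable ca] [Decidable cb]
    (acc : List (List Int)) (r1 r2 : List Int) :
    (if c then
        (if cb then pvAdd (if ca then pvAdd acc r1 else acc) r2
         else (if ca then pvAdd acc r1 else acc))
      else acc)
      = pvCStep (c ∧ cb) r2 (pvCStep (c ∧ ca) r1 acc) := by
  by_cases h1 : c <;> by_cases h2 : ca <;> by_cases h3 : cb <;> simp [pvCStep, h1, h2, h3]

theorem pvCellA_flat (M N : Int) (acc : List (List Int)) (i j : Int) :
    pvCellA M N acc i j =
      pvCStep (j - 2 ≥ 0 ∧ i - 1 ≥ 0) (pvRow M N (i*N + j) ((i-1)*N + j - 2))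
      (pvCStep (j - 2 ≥ 0 ∧ i + 1 < M) (pvRow M N (i*N + j) ((i+1)*N + j - 2))
      (pvCStep (j + 2 < N ∧ i - 1 ≥ 0) (pvRow M N (i*N + j) ((i-1)*N + j + 2))
      (pvCStep (j + 2 < N ∧ i + 1 < M) (pvRow M N (i*N + j) ((i+1)*N + j + 2))
      (pvCStep (i - 2 ≥ 0 ∧ j - 1 ≥ 0) (pvRow M N (i*N + j) ((i-2)*N + j - 1))
      (pvCStep (i - 2 ≥ 0 ∧ j + 1 < N) (pvRow M N (i*N + j) ((i-2)*N + j + 1))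
      (pvCStep (i + 2 < M ∧ j - 1 ≥ 0) (pvRow M N (i*N + j) ((i+2)*N + j - 1))
      (pvCStep (i + 2 < M ∧ j + 1 < N) (pvRow M N (i*N + j) ((i+2)*N + j + 1)) acc))))))) := by
  simp only [pvCellA]
  rw [pvGrp, pvGrp, pvGrp, pvGrp]

theorem pvCellB_flat (M N : Int) (acc : List (List Int)) (i j : Int) :
    pvCellB M N acc i j =
      pvBStep (0 ≤ i+1 ∧ i+1 < M ∧ 0 ≤ j+(-2) ∧ j+(-2) < N) (pvRow M N (i*N + j) ((i+1)*N + (j+(-2))))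
      (pvBStep (0 ≤ i+1 ∧ i+1 < M ∧ 0 ≤ j+2 ∧ j+2 < N) (pvRow M N (i*N + j) ((i+1)*N + (j+2)))
      (pvBStep (0 ≤ i+2 ∧ i+2 < M ∧ 0 ≤ j+(-1) ∧ j+(-1) < N) (pvRow M N (i*N + j) ((i+2)*N + (j+(-1))))
      (pvBStep (0 ≤ i+2 ∧ i+2 < M ∧ 0 ≤ j+1 ∧ j+1 < N) (pvRow M N (i*N + j) ((i+2)*N + (j+1))) acc))) := by
  simp only [pvCellB, List.foldl_cons, List.foldl_nil, pvBStep]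

theorem pvCellB_append (M N : Int) (acc : List (List Int)) (i j : Int) :
    pvCellB M N acc i j = acc ++ pvCellB M N [] i j := by
  rw [pvCellB_flat, pvCellB_flat]; unfold pvBStep
  split_ifs <;> simp

-- ---- row-vector facts ----

theorem pvRow_eq_set (M N p q : Int) (hp : 0 ≤ p) (hq : 0 ≤ q) :
    pvRow M N p q = ((List.replicate (M*N).toNat 0).set p.toNat 1).set q.toNat 1 := by
  simp [pvRow, PySem.List.pySetD_of_nonneg, hp, hq]

theorem pvRow_comm (M N p q : Int) (hp : 0 ≤ p) (hq : 0 ≤ q) :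
    pvRow M N p q = pvRow M N q p := by
  by_cases h : p = q
  · rw [h]
  · rw [pvRow_eq_set M N p q hp hq, pvRow_eq_set M N q p hq hp]
    exact List.set_comm _ _ (by omega)

theorem pvRow_get (M N p q : Int) (hp : 0 ≤ p) (hq : 0 ≤ q) (k : Nat) (hk : k < (M*N).toNat) :
    (pvRow M N p q)[k]? = some (if k = q.toNat then 1 else if k = p.toNat then 1 else 0) := by
  rw [pvRow_eq_set M N p q hp hq]
  by_cases h1 : k = q.toNat
  · subst h1
    rw [List.getElem?_set_self (by simp; omega), if_pos rfl]
  · rw [List.getElem?_set_ne (by omega)]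
    by_cases h2 : k = p.toNat
    · subst h2
      rw [List.getElem?_set_self (by simp; omega), if_neg h1, if_pos rfl]
    · rw [List.getElem?_set_ne (by omega), List.getElem?_replicate, if_pos hk,
        if_neg h1, if_neg h2]

theorem pvRow_inj (M N p q p' q' : Int) (hp : 0 ≤ p) (hpM : p < M*N) (hq : 0 ≤ q) (hqM : q < M*N)
    (hp' : 0 ≤ p') (hpM' : p' < M*N) (hq' : 0 ≤ q') (hqM' : q' < M*N)
    (_hpq : p ≠ q) (hpq' : p' ≠ q') (h : pvRow M N p q = pvRow M N p' q') :
    (p = p' ∧ q = q') ∨ (p = q' ∧ q = p') := by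
  have key : ∀ k : Nat, k < (M*N).toNat →
      (if k = q.toNat then (1:Int) else if k = p.toNat then 1 else 0)
        = (if k = q'.toNat then 1 else if k = p'.toNat then 1 else 0) := by
    intro k hk
    have hcong := congrArg (fun l : List Int => l[k]?) h
    simp only [pvRow_get M N p q hp hq k hk, pvRow_get M N p' q' hp' hq' k hk,
      Option.some.injEq] at hcong
    exact hcong
  have k1 := key p.toNat (by omega)
  have k2 := key q.toNat (by omega)
  have k3 := key p'.toNat (by omega)
  have k4 := key q'.toNat (by omega)
  rw [if_neg (show p.toNat ≠ q.toNat by omega), if_pos rfl] at k1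
  rw [if_pos rfl] at k2
  rw [if_neg (show p'.toNat ≠ q'.toNat by omega), if_pos rfl] at k3
  rw [if_pos rfl] at k4
  have d1 : p = q' ∨ p = p' := by
    by_cases a1 : p.toNat = q'.toNat
    · left; omega
    · by_cases a2 : p.toNat = p'.toNat
      · right; omega
      · rw [if_neg a1, if_neg a2] at k1; exact absurd k1 (by norm_num)
  have d2 : q = q' ∨ q = p' := by
    by_cases a1 : q.toNat = q'.toNat
    · left; omega
    · by_cases a2 : q.toNat = p'.toNat
      · right; omega
      · rw [if_neg a1, if_neg a2] at k2; exact absurd k2 (by norm_num)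
  have d3 : p' = q ∨ p' = p := by
    by_cases a1 : p'.toNat = q.toNat
    · left; omega
    · by_cases a2 : p'.toNat = p.toNat
      · right; omega
      · rw [if_neg a1, if_neg a2] at k3; exact absurd k3 (by norm_num)
  have d4 : q' = q ∨ q' = p := by
    by_cases a1 : q'.toNat = q.toNat
    · left; omega
    · by_cases a2 : q'.toNat = p.toNat
      · right; omega
      · rw [if_neg a1, if_neg a2] at k4; exact absurd k4 (by norm_num)
  omega

-- ---- row-major index facts ----

theorem pvIdx_lt (N i j i' j' : Int) (hj : 0 ≤ j) (hjN : j < N) (hj' : 0 ≤ j') (hjN' : j' < N)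
    (h : i < i' ∨ (i = i' ∧ j < j')) : i*N + j < i'*N + j' := by
  rcases h with h | ⟨rfl, h⟩
  · have h2 : (i+1)*N ≤ i'*N := mul_le_mul_of_nonneg_right (by omega) (by omega)
    have h3 : (i+1)*N = i*N + N := by ring
    omega
  · omega

theorem pvIdx_inj (N i j i' j' : Int) (hj : 0 ≤ j) (hjN : j < N) (hj' : 0 ≤ j') (hjN' : j' < N)
    (h : i*N + j = i'*N + j') : i = i' ∧ j = j' := by
  rcases lt_trichotomy i i' with hc | hc | hc
  · have := pvIdx_lt N i j i' j' hj hjN hj' hjN' (Or.inl hc); omega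
  · subst hc; omega
  · have := pvIdx_lt N i' j' i j hj' hjN' hj hjN (Or.inl hc); omega

theorem pvIdx_bounds (M N i j : Int) (hi : 0 ≤ i) (hiM : i < M) (hj : 0 ≤ j) (hjN : j < N) :
    0 ≤ i*N + j ∧ i*N + j < M*N := by
  have h1 : 0 ≤ i*N := mul_nonneg hi (by omega)
  have h2 : (i+1)*N ≤ M*N := mul_le_mul_of_nonneg_right (by omega) (by omega)
  have h3 : (i+1)*N = i*N + N := by ring
  omega

theorem pvFwd_target_lt (M N i j di dj : Int) (h : pvFwd M N i j di dj) :
    i*N + j < (i+di)*N + (j+dj) := by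
  obtain ⟨hi, hiM, hj, hjN, hmv, h1, h2, h3, h4⟩ := h
  apply pvIdx_lt N i j (i+di) (j+dj) hj hjN h3 h4
  rcases hmv with h | h | h | h <;> (rw [Prod.ext_iff] at h; exact Or.inl (by omega))

-- ---- freshness / duplication facts ----

theorem pvRow_notseen (M N i j di dj : Int) (h : pvFwd M N i j di dj) :
    ¬ pvSeen M N i j (pvRow M N (i*N + j) ((i+di)*N + (j+dj))) := by
  rintro ⟨i', j', di', dj', hf', hlt, heq⟩
  obtain ⟨hi, hiM, hj, hjN, hmv, h1, h2, h3, h4⟩ := h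
  obtain ⟨hi', hiM', hj', hjN', hmv', h1', h2', h3', h4'⟩ := hf'
  have hb1 := pvIdx_bounds M N i j hi hiM hj hjN
  have hb2 := pvIdx_bounds M N (i+di) (j+dj) h1 h2 h3 h4
  have hb3 := pvIdx_bounds M N i' j' hi' hiM' hj' hjN'
  have hb4 := pvIdx_bounds M N (i'+di') (j'+dj') h1' h2' h3' h4'
  have hlt1 := pvFwd_target_lt M N i j di dj ⟨hi, hiM, hj, hjN, hmv, h1, h2, h3, h4⟩
  have hlt2 := pvFwd_target_lt M N i' j' di' dj' ⟨hi', hiM', hj', hjN', hmv', h1', h2', h3', h4'⟩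
  have hlt3 : i'*N + j' < i*N + j := pvIdx_lt N i' j' i j hj' hjN' hj hjN hlt
  have := pvRow_inj M N (i*N+j) ((i+di)*N+(j+dj)) (i'*N+j') ((i'+di')*N+(j'+dj'))
    hb1.1 hb1.2 hb2.1 hb2.2 hb3.1 hb3.2 hb4.1 hb4.2 (by omega) (by omega) heq
  omega

theorem pvFwd_ne (M N i j di dj di' dj' : Int) (h1 : pvFwd M N i j di dj)
    (h2 : pvFwd M N i j di' dj') (hne : (di, dj) ≠ (di', dj')) :
    pvRow M N (i*N + j) ((i+di)*N + (j+dj)) ≠ pvRow M N (i*N + j) ((i+di')*N + (j+dj')) := by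
  intro heq
  obtain ⟨hi, hiM, hj, hjN, hmv, ha1, ha2, ha3, ha4⟩ := h1
  obtain ⟨_, _, _, _, hmv', hb1, hb2, hb3, hb4⟩ := h2
  have hc1 := pvIdx_bounds M N i j hi hiM hj hjN
  have hc2 := pvIdx_bounds M N (i+di) (j+dj) ha1 ha2 ha3 ha4
  have hc3 := pvIdx_bounds M N (i+di') (j+dj') hb1 hb2 hb3 hb4
  have hlt1 := pvFwd_target_lt M N i j di dj ⟨hi, hiM, hj, hjN, hmv, ha1, ha2, ha3, ha4⟩
  have hlt2 := pvFwd_target_lt M N i j di' dj' ⟨hi, hiM, hj, hjN, hmv', hb1, hb2, hb3, hb4⟩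
  rcases pvRow_inj M N (i*N+j) ((i+di)*N+(j+dj)) (i*N+j) ((i+di')*N+(j+dj'))
      hc1.1 hc1.2 hc2.1 hc2.2 hc1.1 hc1.2 hc3.1 hc3.2 (by omega) (by omega) heq with
    ⟨_, hqq⟩ | ⟨hpq, _⟩
  · have := pvIdx_inj N (i+di) (j+dj) (i+di') (j+dj') ha3 ha4 hb3 hb4 hqq
    exact hne (by rw [Prod.ext_iff]; constructor <;> omega)
  · omega

theorem pvFwd_notmem (M N i j di dj : Int) (S : List (List Int)) (hS : pvChar M N i j S)
    (h : pvFwd M N i j di dj) : pvRow M N (i*N + j) ((i+di)*N + (j+dj)) ∉ S :=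
  fun hmem => pvRow_notseen M N i j di dj h ((hS _).mp hmem)

theorem pvBwd_mem (M N I J : Int) (S : List (List Int)) (hS : pvChar M N I J S)
    (hI : 0 ≤ I) (hIM : I < M) (hJ : 0 ≤ J) (hJN : J < N)
    (r c di dj : Int) (hmv : pvFwdMove (di, dj)) (hr : r = I - di) (hc : c = J - dj)
    (h0r : 0 ≤ r) (h0c : 0 ≤ c) (hcN : c < N) :
    pvRow M N (I*N + J) (r*N + c) ∈ S := by
  have hdi : 1 ≤ di := by rcases hmv with h | h | h | h <;> (rw [Prod.ext_iff] at h; omega)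
  have hf : pvFwd M N r c di dj :=
    ⟨h0r, by omega, h0c, hcN, hmv, by omega, by omega, by omega, by omega⟩
  apply (hS _).mpr
  refine ⟨r, c, di, dj, hf, Or.inl (by omega), ?_⟩
  have e1 : (r+di) = I := by omega
  have e2 : (c+dj) = J := by omega
  rw [e1, e2]
  have hb1 := pvIdx_bounds M N I J hI hIM hJ hJN
  have hb2 := pvIdx_bounds M N r c h0r (by omega) h0c hcN
  exact pvRow_comm M N (I*N+J) (r*N+c) hb1.1 hb2.1

-- ---- membership in one cell's forward rows ----

theorem mem_pvCell (M N i j : Int) (row : List Int) :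
    row ∈ pvCellB M N [] i j ↔
      ∃ di dj, pvFwdMove (di, dj) ∧ 0 ≤ i + di ∧ i + di < M ∧ 0 ≤ j + dj ∧ j + dj < N ∧
        row = pvRow M N (i*N + j) ((i+di)*N + (j+dj)) := by
  rw [pvCellB_flat]
  simp only [mem_pvBStep, List.not_mem_nil, or_false]
  constructor
  · rintro (⟨hg, rfl⟩ | ⟨hg, rfl⟩ | ⟨hg, rfl⟩ | ⟨hg, rfl⟩)
    · exact ⟨1, -2, Or.inr (Or.inr (Or.inr rfl)), hg.1, hg.2.1, hg.2.2.1, hg.2.2.2, rfl⟩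
    · exact ⟨1, 2, Or.inr (Or.inr (Or.inl rfl)), hg.1, hg.2.1, hg.2.2.1, hg.2.2.2, rfl⟩
    · exact ⟨2, -1, Or.inr (Or.inl rfl), hg.1, hg.2.1, hg.2.2.1, hg.2.2.2, rfl⟩
    · exact ⟨2, 1, Or.inl rfl, hg.1, hg.2.1, hg.2.2.1, hg.2.2.2, rfl⟩
  · rintro ⟨di, dj, hmv, h1, h2, h3, h4, rfl⟩
    rcases hmv with hm | hm | hm | hm <;> rw [Prod.ext_iff] at hm <;>
      obtain ⟨rfl, rfl⟩ := hm
    · exact Or.inr (Or.inr (Or.inr ⟨⟨h1, h2, h3, h4⟩, rfl⟩))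
    · exact Or.inr (Or.inr (Or.inl ⟨⟨h1, h2, h3, h4⟩, rfl⟩))
    · exact Or.inr (Or.inl ⟨⟨h1, h2, h3, h4⟩, rfl⟩)
    · exact Or.inl ⟨⟨h1, h2, h3, h4⟩, rfl⟩

-- ---- the invariant through one cell ----

theorem pvChar_nil (M N : Int) : pvChar M N 0 0 [] := by
  intro row
  simp only [List.not_mem_nil, false_iff]
  rintro ⟨i, j, di, dj, ⟨hi, _, hj, _⟩, hlt, _⟩
  omega

theorem pvChar_step (M N i j : Int) (S : List (List Int)) (hS : pvChar M N i j S)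
    (hi : 0 ≤ i) (hiM : i < M) (hj : 0 ≤ j) (hjN : j < N) :
    pvChar M N i (j+1) (S ++ pvCellB M N [] i j) := by
  intro row
  rw [List.mem_append, hS row, mem_pvCell]
  constructor
  · rintro (⟨i', j', di', dj', hf, hlt, he⟩ | ⟨di, dj, hmv, h1, h2, h3, h4, he⟩)
    · exact ⟨i', j', di', dj', hf, by omega, he⟩
    · exact ⟨i, j, di, dj, ⟨hi, hiM, hj, hjN, hmv, h1, h2, h3, h4⟩, by omega, he⟩
  · rintro ⟨i', j', di', dj', hf, hlt, he⟩
    by_cases hc : i' = i ∧ j' = j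
    · obtain ⟨rfl, rfl⟩ := hc
      obtain ⟨_, _, _, _, hmv, h1, h2, h3, h4⟩ := hf
      exact Or.inr ⟨di', dj', hmv, h1, h2, h3, h4, he⟩
    · exact Or.inl ⟨i', j', di', dj', hf, by omega, he⟩

theorem pvChar_roll (M N i j : Int) (S : List (List Int)) (hS : pvChar M N i j S)
    (hN : N ≤ j) : pvChar M N (i+1) 0 S := by
  intro row
  rw [hS row]
  constructor <;> rintro ⟨i', j', di', dj', hf, hlt, he⟩ <;>
    exact ⟨i', j', di', dj', hf, by obtain ⟨_, _, h1, h2, _⟩ := hf; omega, he⟩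

theorem pvStepA_eq (M N i j : Int) (S : List (List Int)) (hS : pvChar M N i j S)
    (hi : 0 ≤ i) (hiM : i < M) (hj : 0 ≤ j) (hjN : j < N) :
    pvCellA M N S i j = pvCellB M N S i j := by
  rw [pvCellA_flat, pvCellB_flat]
  have e1 : (i+2)*N + j + 1 = (i+2)*N + (j+1) := by ring
  have e2 : (i+2)*N + j - 1 = (i+2)*N + (j+(-1)) := by ring
  have e3 : (i+1)*N + j + 2 = (i+1)*N + (j+2) := by ring
  have e4 : (i+1)*N + j - 2 = (i+1)*N + (j+(-2)) := by ring
  have e5 : (i-1)*N + j - 2 = (i-1)*N + (j-2) := by ring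
  have e6 : (i-1)*N + j + 2 = (i-1)*N + (j+2) := by ring
  have e7 : (i-2)*N + j + 1 = (i-2)*N + (j+1) := by ring
  have e8 : (i-2)*N + j - 1 = (i-2)*N + (j-1) := by ring
  rw [e1, e2, e3, e4, e5, e6, e7, e8]
  -- the four forward candidates are genuine forward edges (under their guards)
  have hf1 : (i + 2 < M ∧ j + 1 < N) → pvFwd M N i j 2 1 :=
    fun h => ⟨hi, hiM, hj, hjN, Or.inl rfl, by omega, by omega, by omega, by omega⟩
  have hf2 : (i + 2 < M ∧ j - 1 ≥ 0) → pvFwd M N i j 2 (-1) :=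
    fun h => ⟨hi, hiM, hj, hjN, Or.inr (Or.inl rfl), by omega, by omega, by omega, by omega⟩
  have hf3 : (j + 2 < N ∧ i + 1 < M) → pvFwd M N i j 1 2 :=
    fun h => ⟨hi, hiM, hj, hjN, Or.inr (Or.inr (Or.inl rfl)), by omega, by omega, by omega, by omega⟩
  have hf4 : (j - 2 ≥ 0 ∧ i + 1 < M) → pvFwd M N i j 1 (-2) :=
    fun h => ⟨hi, hiM, hj, hjN, Or.inr (Or.inr (Or.inr rfl)), by omega, by omega, by omega, by omega⟩
  -- each backward candidate is already in S (its forward twin came from an earlier cell)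
  have hm8 : (j - 2 ≥ 0 ∧ i - 1 ≥ 0) → pvRow M N (i*N + j) ((i-1)*N + (j-2)) ∈ S :=
    fun h => pvBwd_mem M N i j S hS hi hiM hj hjN (i-1) (j-2) 1 2
      (Or.inr (Or.inr (Or.inl rfl))) (by omega) (by omega) (by omega) (by omega) (by omega)
  have hm6 : (j + 2 < N ∧ i - 1 ≥ 0) → pvRow M N (i*N + j) ((i-1)*N + (j+2)) ∈ S :=
    fun h => pvBwd_mem M N i j S hS hi hiM hj hjN (i-1) (j+2) 1 (-2)
      (Or.inr (Or.inr (Or.inr rfl))) (by omega) (by omega) (by omega) (by omega) (by omega)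
  have hm4 : (i - 2 ≥ 0 ∧ j - 1 ≥ 0) → pvRow M N (i*N + j) ((i-2)*N + (j-1)) ∈ S :=
    fun h => pvBwd_mem M N i j S hS hi hiM hj hjN (i-2) (j-1) 2 1
      (Or.inl rfl) (by omega) (by omega) (by omega) (by omega) (by omega)
  have hm3 : (i - 2 ≥ 0 ∧ j + 1 < N) → pvRow M N (i*N + j) ((i-2)*N + (j+1)) ∈ S :=
    fun h => pvBwd_mem M N i j S hS hi hiM hj hjN (i-2) (j+1) 2 (-1)
      (Or.inr (Or.inl rfl)) (by omega) (by omega) (by omega) (by omega) (by omega)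
  -- drop the four backward dedup-appends: they always hit an existing row
  rw [pvCStep_skip (fun h => pvCStep_mono (pvCStep_mono (pvCStep_mono (pvCStep_mono
    (pvCStep_mono (pvCStep_mono (pvCStep_mono (hm8 h))))))))]
  rw [pvCStep_skip (fun h => pvCStep_mono (pvCStep_mono (pvCStep_mono (pvCStep_mono
    (pvCStep_mono (hm6 h))))))]
  rw [pvCStep_skip (fun h => pvCStep_mono (pvCStep_mono (pvCStep_mono (hm4 h))))]
  rw [pvCStep_skip (fun h => pvCStep_mono (pvCStep_mono (hm3 h)))]
  -- the four forward dedup-appends never hit anything: turn them into plain appends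
  have h1 : (i + 2 < M ∧ j + 1 < N) → pvRow M N (i*N + j) ((i+2)*N + (j+1)) ∉ S :=
    fun h => pvFwd_notmem M N i j 2 1 S hS (hf1 h)
  rw [pvCStep_add h1]
  have h2 : (i + 2 < M ∧ j - 1 ≥ 0) →
      pvRow M N (i*N + j) ((i+2)*N + (j+(-1))) ∉
        pvBStep (i + 2 < M ∧ j + 1 < N) (pvRow M N (i*N + j) ((i+2)*N + (j+1))) S :=
    fun h => pvBStep_notmem (pvFwd_notmem M N i j 2 (-1) S hS (hf2 h))
      (fun hg => pvFwd_ne M N i j 2 (-1) 2 1 (hf2 h) (hf1 hg) (by decide))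
  rw [pvCStep_add h2]
  have h3 : (j + 2 < N ∧ i + 1 < M) →
      pvRow M N (i*N + j) ((i+1)*N + (j+2)) ∉
        pvBStep (i + 2 < M ∧ j - 1 ≥ 0) (pvRow M N (i*N + j) ((i+2)*N + (j+(-1))))
          (pvBStep (i + 2 < M ∧ j + 1 < N) (pvRow M N (i*N + j) ((i+2)*N + (j+1))) S) :=
    fun h => pvBStep_notmem
      (pvBStep_notmem (pvFwd_notmem M N i j 1 2 S hS (hf3 h))
        (fun hg => pvFwd_ne M N i j 1 2 2 1 (hf3 h) (hf1 hg) (by decide)))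
      (fun hg => pvFwd_ne M N i j 1 2 2 (-1) (hf3 h) (hf2 hg) (by decide))
  rw [pvCStep_add h3]
  have h4 : (j - 2 ≥ 0 ∧ i + 1 < M) →
      pvRow M N (i*N + j) ((i+1)*N + (j+(-2))) ∉
        pvBStep (j + 2 < N ∧ i + 1 < M) (pvRow M N (i*N + j) ((i+1)*N + (j+2)))
          (pvBStep (i + 2 < M ∧ j - 1 ≥ 0) (pvRow M N (i*N + j) ((i+2)*N + (j+(-1))))
            (pvBStep (i + 2 < M ∧ j + 1 < N) (pvRow M N (i*N + j) ((i+2)*N + (j+1))) S)) :=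
    fun h => pvBStep_notmem (pvBStep_notmem
      (pvBStep_notmem (pvFwd_notmem M N i j 1 (-2) S hS (hf4 h))
        (fun hg => pvFwd_ne M N i j 1 (-2) 2 1 (hf4 h) (hf1 hg) (by decide)))
      (fun hg => pvFwd_ne M N i j 1 (-2) 2 (-1) (hf4 h) (hf2 hg) (by decide)))
      (fun hg => pvFwd_ne M N i j 1 (-2) 1 2 (hf4 h) (hf3 hg) (by decide))
  rw [pvCStep_add h4]
  -- same appends, equivalent guards
  rw [pvBStep_congr (show (j - 2 ≥ 0 ∧ i + 1 < M) ↔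
        (0 ≤ i+1 ∧ i+1 < M ∧ 0 ≤ j+(-2) ∧ j+(-2) < N) by omega),
    pvBStep_congr (show (j + 2 < N ∧ i + 1 < M) ↔
        (0 ≤ i+1 ∧ i+1 < M ∧ 0 ≤ j+2 ∧ j+2 < N) by omega),
    pvBStep_congr (show (i + 2 < M ∧ j - 1 ≥ 0) ↔
        (0 ≤ i+2 ∧ i+2 < M ∧ 0 ≤ j+(-1) ∧ j+(-1) < N) by omega),
    pvBStep_congr (show (i + 2 < M ∧ j + 1 < N) ↔
        (0 ≤ i+2 ∧ i+2 < M ∧ 0 ≤ j+1 ∧ j+1 < N) by omega)]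

-- ---- the two folds ----

theorem pvInner (M N i : Int) (hi : 0 ≤ i) (hiM : i < M) :
    ∀ (k : Nat) (j : Int) (S : List (List Int)), 0 ≤ j → (N - j).toNat = k →
      pvChar M N i j S →
      (PySem.List.pyRange j N 1).foldl (fun acc j => pvCellA M N acc i j) S
          = (PySem.List.pyRange j N 1).foldl (fun acc j => pvCellB M N acc i j) S
        ∧ pvChar M N (i+1) 0
            ((PySem.List.pyRange j N 1).foldl (fun acc j => pvCellA M N acc i j) S) := by
  intro k
  induction k with
  | zero =>
    intro j S hj hk hS
    rw [PySem.List.pyRange_one_eq_nil (by omega)]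
    exact ⟨rfl, pvChar_roll M N i j S hS (by omega)⟩
  | succ k ih =>
    intro j S hj hk hS
    have hjN : j < N := by omega
    rw [PySem.List.pyRange_one_cons (by omega)]
    simp only [List.foldl_cons]
    have hstep := pvStepA_eq M N i j S hS hi hiM hj hjN
    have happ := pvCellB_append M N S i j
    have hchar : pvChar M N i (j+1) (pvCellA M N S i j) := by
      rw [hstep, happ]; exact pvChar_step M N i j S hS hi hiM hj hjN
    have := ih (j+1) (pvCellA M N S i j) (by omega) (by omega) hchar
    exact ⟨by rw [hstep] at this ⊢; exact this.1, this.2⟩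

theorem pvOuter (M N : Int) :
    ∀ (k : Nat) (i : Int) (S : List (List Int)), 0 ≤ i → (M - i).toNat = k →
      pvChar M N i 0 S →
      (PySem.List.pyRange i M 1).foldl (fun acc i =>
          (PySem.List.pyRange 0 N 1).foldl (fun acc j => pvCellA M N acc i j) acc) S
        = (PySem.List.pyRange i M 1).foldl (fun acc i =>
          (PySem.List.pyRange 0 N 1).foldl (fun acc j => pvCellB M N acc i j) acc) S := by
  intro k
  induction k with
  | zero =>
    intro i S hi hk hS
    rw [PySem.List.pyRange_one_eq_nil (show M ≤ i by omega)]
    rfl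
  | succ k ih =>
    intro i S hi hk hS
    have hiM : i < M := by omega
    rw [PySem.List.pyRange_one_cons (show i < M by omega)]
    simp only [List.foldl_cons]
    have hin := pvInner M N i hi hiM (N - 0).toNat 0 S (by omega) rfl hS
    rw [hin.1]
    have hchar := hin.2
    rw [hin.1] at hchar
    exact ih (i+1) _ (by omega) (by omega) hchar

-- ===== VERDICT (by name: the statement is the Claim_ definition above) =====
theorem create_constraint_matrix_spec : Claim_equal_create_constraint_matrix := by
  intro M N _
  unfold Spec_create_constraint_matrix create_constraint_matrix create_constraint_matrix_alt
  exact pvOuter M N (M - 0).toNat 0 [] (by omega) rfl (pvChar_nil M N)
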